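-- pv_equiv track=rewrite | github.com/EinPy/Competition_lib | CodeForces/2022_12_12_Educational_Div2/D.py | longest_lucky_chain
-- ===== SOURCE A (Python) =====
-- def gcd(a, b):
--     if b == 0:
--         return a
--     else:
--         return gcd(b, a % b)
--
-- def longest_lucky_chain(x, y):
--     if gcd(x, y) != 1:
--         return 0
--     else:
--         k = 0
--         if x == y+1 or y == x+1:
--             return -1
--         while gcd(x + k, y + k) == 1:
--             if k >= 200:
--                 return -1
--             k += 1
--         return k
-- ===== SOURCE B (Python) =====
-- def gcd(a, b):
--     if b == 0:
--         return a
--     else: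
--         return gcd(b, a % b)
--
-- def longest_lucky_chain(x, y):
--     if gcd(x, y) != 1:
--         return 0
--     d = abs(y - x)
--     if d == 0:
--         return 1
--     if d == 1:
--         return -1
--     # smallest k >= 0 with gcd(x+k, y+k) > 1 is the minimum, over the
--     # divisors q >= 2 of d = |y-x|, of the least k making q divide x+k.
--     best = (-x) % d
--     p = 2
--     while p * p <= d:
--         if d % p == 0:
--             best = min(best, (-x) % p, (-x) % (d // p))
--         p += 1
--     return best if best <= 200 else -1
-- ===== Notes on version B (the rewrite author's own statement) =====
-- stated objective: alternative
-- what changed: Replaces A's linear scan of k=0..200 testing gcd(x+k,y+k) each time with number theory: the answer is the minimum, over the divisors q>=2 of d=|y-x| (enumerated in pairs up to sqrt(d)), of (-x) mod q, capped at 200; the degenerate cases d=0 and |d|=1 are handled directly.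
import Mathlib
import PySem

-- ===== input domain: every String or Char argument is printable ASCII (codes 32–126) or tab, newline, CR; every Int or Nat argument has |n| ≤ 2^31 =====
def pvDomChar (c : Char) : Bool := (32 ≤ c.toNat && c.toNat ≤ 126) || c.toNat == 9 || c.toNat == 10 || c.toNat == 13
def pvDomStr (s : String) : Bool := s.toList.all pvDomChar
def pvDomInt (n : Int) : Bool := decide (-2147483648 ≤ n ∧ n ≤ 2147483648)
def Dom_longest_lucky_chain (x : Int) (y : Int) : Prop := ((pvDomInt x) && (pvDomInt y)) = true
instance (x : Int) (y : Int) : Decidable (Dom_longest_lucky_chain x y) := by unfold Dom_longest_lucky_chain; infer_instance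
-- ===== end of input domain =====

-- B replaces A's scan of k = 0..200 (a recursive-gcd test per k) by a divisor enumeration of
-- d = |y-x| up to sqrt(d): the answer is min over divisors q ≥ 2 of d of ((-x) mod q), capped at 200.

-- ===== PORT A =====
-- the module-level helper `gcd` (Python's recursive gcd with floor mod; shared by A and B)
def pyGcd (a : Int) (b : Int) : Int :=
  if b = 0 then a else pyGcd b (PySem.Int.mod a b)
termination_by b.natAbs
decreasing_by
  rename_i hb
  rcases lt_or_gt_of_ne hb with h | h
  · have := PySem.Int.mod_neg_bounds a h; omega
  · have h1 := PySem.Int.mod_nonneg a h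
    have h2 := PySem.Int.mod_lt a h
    omega

-- the while loop of A (k only increases; the `k >= 200` check bounds it)
def llcLoop (x : Int) (y : Int) (k : Int) : Int :=
  if pyGcd (x + k) (y + k) = 1 then
    if k ≥ 200 then -1 else llcLoop x y (k + 1)
  else k
termination_by (201 - k).toNat
decreasing_by rename_i h1 h2; omega

def longest_lucky_chain (x : Int) (y : Int) : Int :=
  if pyGcd x y ≠ 1 then 0
  else if x = y + 1 ∨ y = x + 1 then -1
  else llcLoop x y 0

-- ===== PORT B =====
-- B's while loop over trial divisors p = 2, 3, … while p*p <= d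
def bestLoop (x : Int) (d : Int) (p : Int) (best : Int) : Int :=
  if p * p ≤ d then
    bestLoop x d (p + 1)
      (if PySem.Int.mod d p = 0 then
        min (min best (PySem.Int.mod (-x) p)) (PySem.Int.mod (-x) (PySem.Int.floordiv d p))
      else best)
  else best
termination_by (d + 2 - p).toNat
decreasing_by
  rename_i h
  have hpd : p ≤ d := by nlinarith [mul_self_nonneg p]
  omega

def longest_lucky_chain_alt (x : Int) (y : Int) : Int :=
  if pyGcd x y ≠ 1 then 0
  else
    let d := |y - x|
    if d = 0 then 1
    else if d = 1 then -1
    else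
      let best := bestLoop x d 2 (PySem.Int.mod (-x) d)
      if best ≤ 200 then best else -1

-- ===== PRECONDITION & SPEC =====
def Spec_longest_lucky_chain (x : Int) (y : Int) (out : Int) : Prop := out = longest_lucky_chain_alt x y
instance (x : Int) (y : Int) (out : Int) : Decidable (Spec_longest_lucky_chain x y out) := by unfold Spec_longest_lucky_chain; infer_instance

-- ===== CLAIM (what is proved, stated in full; the proofs are below) =====
def Claim_equal_longest_lucky_chain : Prop := ∀ (x : Int) (y : Int), Dom_longest_lucky_chain x y → Spec_longest_lucky_chain x y (longest_lucky_chain x y)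

-- ===== LEMMAS AND PROOFS =====

-- Python's recursive gcd equals Int.gcd when the second argument is positive
theorem pyGcd_eq_gcd_aux : ∀ (n : Nat) (a b : Int), b.natAbs ≤ n → 0 < b → pyGcd a b = Int.gcd a b := by
  intro n
  induction n with
  | zero => intro a b h hb; omega
  | succ n ih =>
    intro a b h hb
    rw [pyGcd, if_neg (by omega)]
    rw [PySem.Int.mod_eq_emod_of_pos hb]
    by_cases h0 : a % b = 0
    · rw [h0, pyGcd]
      simp only [↓reduceIte]
      have hdvd : b ∣ a := Int.dvd_of_emod_eq_zero h0
      have hg : Int.gcd a b = b.natAbs := Nat.gcd_eq_right (Int.natAbs_dvd_natAbs.mpr hdvd)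
      rw [hg, Int.natAbs_of_nonneg hb.le]
    · have hpos : 0 < a % b := lt_of_le_of_ne (Int.emod_nonneg a (by omega)) (Ne.symm h0)
      have hlt : a % b < b := Int.emod_lt_of_pos a hb
      rw [ih b (a % b) (by omega) hpos]
      congr 1
      conv_lhs => rw [Int.emod_def a b, show a - b * (a / b) = a + -(a / b) * b by ring]
      rw [Int.gcd_add_mul_right_right]
      exact Int.gcd_comm b a

theorem pyGcd_eq_gcd (a b : Int) (hb : 0 < b) : pyGcd a b = Int.gcd a b :=
  pyGcd_eq_gcd_aux b.natAbs a b le_rfl hb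

theorem pyGcd_zero (a : Int) : pyGcd a 0 = a := by rw [pyGcd]; simp

theorem pyGcd_nonpos_aux : ∀ (n : Nat) (a b : Int), b.natAbs ≤ n → b < 0 → pyGcd a b ≤ 0 := by
  intro n
  induction n with
  | zero => intro a b h hb; omega
  | succ n ih =>
    intro a b h hb
    rw [pyGcd, if_neg (by omega)]
    obtain ⟨h1, h2⟩ := PySem.Int.mod_neg_bounds a hb
    by_cases h0 : PySem.Int.mod a b = 0
    · rw [h0, pyGcd]; simp only [↓reduceIte]; omega
    · exact ih b _ (by omega) (by omega)

-- A's loop returns m when m is the first index ≥ k (and ≤ 200) whose gcd is not 1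
theorem llcLoop_finds (x y : Int) : ∀ (n : Nat) (k m : Int), (m - k).toNat ≤ n → k ≤ m → m ≤ 200 →
    pyGcd (x + m) (y + m) ≠ 1 → (∀ j, k ≤ j → j < m → pyGcd (x + j) (y + j) = 1) →
    llcLoop x y k = m := by
  intro n
  induction n with
  | zero =>
    intro k m hn hkm _ hg _
    have : k = m := by omega
    subst this
    rw [llcLoop, if_neg hg]
  | succ n ih =>
    intro k m hn hkm hm hg hprev
    by_cases hkm' : k = m
    · subst hkm'; rw [llcLoop, if_neg hg]
    · rw [llcLoop, if_pos (hprev k le_rfl (by omega)), if_neg (by omega)]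
      exact ih (k + 1) m (by omega) (by omega) hm hg (fun j h1 h2 => hprev j (by omega) h2)

theorem llcLoop_none (x y : Int) : ∀ (n : Nat) (k : Int), (200 - k).toNat ≤ n → k ≤ 200 →
    (∀ j, k ≤ j → j ≤ 200 → pyGcd (x + j) (y + j) = 1) → llcLoop x y k = -1 := by
  intro n
  induction n with
  | zero =>
    intro k hn hk hall
    have : k = 200 := by omega
    subst this
    rw [llcLoop, if_pos (hall 200 le_rfl le_rfl), if_pos (by omega)]
  | succ n ih =>
    intro k hn hk hall
    rw [llcLoop, if_pos (hall k le_rfl hk)]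
    by_cases h2 : k ≥ 200
    · rw [if_pos h2]
    · rw [if_neg h2]
      exact ih (k + 1) (by omega) (by omega) (fun j h1 h2 => hall j (by omega) h2)

-- bestLoop never exceeds its accumulator
theorem bestLoop_le (x d : Int) : ∀ (n : Nat) (p best : Int), (d + 2 - p).toNat ≤ n →
    bestLoop x d p best ≤ best := by
  intro n
  induction n with
  | zero =>
    intro p best hn
    have hn' : d + 2 ≤ p := by omega
    rw [bestLoop, if_neg (by nlinarith [mul_self_nonneg p, sq_nonneg (p-1)])]
  | succ n ih =>
    intro p best hn
    rw [bestLoop]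
    by_cases h : p * p ≤ d
    · rw [if_pos h]
      have hpd : p ≤ d := by nlinarith [mul_self_nonneg p]
      have := ih (p + 1) (if PySem.Int.mod d p = 0 then
          min (min best (PySem.Int.mod (-x) p)) (PySem.Int.mod (-x) (PySem.Int.floordiv d p))
        else best) (by omega)
      refine le_trans this ?_
      split_ifs
      · exact le_trans (min_le_left _ _) (le_trans (min_le_left _ _) le_rfl)
      · exact le_rfl
    · rw [if_neg h]

-- bestLoop is bounded by both candidates of any divisor pair it will visit
theorem bestLoop_le_cand (x d : Int) : ∀ (n : Nat) (p best q : Int), (d + 2 - p).toNat ≤ n →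
    0 < p → p ≤ q → q * q ≤ d → PySem.Int.mod d q = 0 →
    bestLoop x d p best ≤ PySem.Int.mod (-x) q ∧
    bestLoop x d p best ≤ PySem.Int.mod (-x) (PySem.Int.floordiv d q) := by
  intro n
  induction n with
  | zero =>
    intro p best q hn hp hpq hq hdvd
    exfalso
    have hn' : d + 2 ≤ p := by omega
    nlinarith [mul_self_nonneg p, sq_nonneg (p-1), sq_nonneg (q-1), mul_self_nonneg q]
  | succ n ih =>
    intro p best q hn hp hpq hq hdvd
    have hppd : p * p ≤ d := by nlinarith
    rw [bestLoop, if_pos hppd]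
    by_cases hpq' : p = q
    · subst hpq'
      rw [if_pos hdvd]
      constructor
      · refine le_trans (bestLoop_le x d (d + 2 - (p+1)).toNat (p+1) _ le_rfl) ?_
        exact le_trans (min_le_left _ _) (min_le_right _ _)
      · refine le_trans (bestLoop_le x d (d + 2 - (p+1)).toNat (p+1) _ le_rfl) ?_
        exact min_le_right _ _
    · have hpd : p ≤ d := by nlinarith
      exact ih (p + 1) _ q (by omega) (by omega) (by omega) hq hdvd

-- bestLoop's result is a candidate: (-x) mod q for some divisor q ≥ 2 of d
theorem bestLoop_is_cand (x d : Int) (hd : 2 ≤ d) : ∀ (n : Nat) (p best : Int), (d + 2 - p).toNat ≤ n →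
    2 ≤ p → (∃ q : Int, q ∣ d ∧ 2 ≤ q ∧ best = PySem.Int.mod (-x) q) →
    ∃ q : Int, q ∣ d ∧ 2 ≤ q ∧ bestLoop x d p best = PySem.Int.mod (-x) q := by
  intro n
  induction n with
  | zero =>
    intro p best hn hp hex
    have hn' : d + 2 ≤ p := by omega
    rw [bestLoop, if_neg (by nlinarith [sq_nonneg (p-1)])]
    exact hex
  | succ n ih =>
    intro p best hn hp hex
    rw [bestLoop]
    by_cases h : p * p ≤ d
    · rw [if_pos h]
      have hpd : p ≤ d := by nlinarith
      refine ih (p + 1) _ (by omega) (by omega) ?_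
      by_cases hdvd : PySem.Int.mod d p = 0
      · rw [if_pos hdvd]
        have hpdvd : p ∣ d := (PySem.Int.mod_eq_zero_iff_dvd d p).mp hdvd
        have hpp : (0:Int) < p := by omega
        have hfd : PySem.Int.floordiv d p = d / p := PySem.Int.floordiv_eq_ediv_of_pos hpp
        have hdp_dvd : d / p ∣ d := Int.ediv_dvd_of_dvd hpdvd
        have hdp2 : 2 ≤ d / p := by
          have : p ≤ d / p := (Int.le_ediv_iff_mul_le hpp).mpr h
          omega
        obtain ⟨q0, hq0d, hq02, hq0e⟩ := hex
        rcases min_choice (min best (PySem.Int.mod (-x) p)) (PySem.Int.mod (-x) (PySem.Int.floordiv d p)) with hm | hm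
        · rcases min_choice best (PySem.Int.mod (-x) p) with hm2 | hm2
          · exact ⟨q0, hq0d, hq02, by rw [hm, hm2, hq0e]⟩
          · exact ⟨p, hpdvd, by omega, by rw [hm, hm2]⟩
        · exact ⟨d / p, hdp_dvd, hdp2, by rw [hm, hfd]⟩
      · rw [if_neg hdvd]; exact hex
    · rw [if_neg h]; exact hex

-- the main equivalence, case d = |y-x| ≥ 2 (y ≥ 1, gcd(x,y) = 1)
theorem llc_main (x y : Int) (hy : 0 < y) (hd2 : 2 ≤ |y - x|) :
    llcLoop x y 0 = (if bestLoop x |y - x| 2 (PySem.Int.mod (-x) |y - x|) ≤ 200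
      then bestLoop x |y - x| 2 (PySem.Int.mod (-x) |y - x|) else -1) := by
  set d : Int := |y - x| with hdset
  have hdpos : (0:Int) < d := by omega
  set m : Int := bestLoop x d 2 (PySem.Int.mod (-x) d) with hmset
  -- the bridge: for k ≥ 0 the loop's test is the coprimality of x+k and d
  have bridge : ∀ k : Int, 0 ≤ k → (pyGcd (x + k) (y + k) = 1 ↔ Int.gcd (x + k) d = 1) := by
    intro k hk
    have hyk : (0:Int) < y + k := by omega
    rw [pyGcd_eq_gcd (x + k) (y + k) hyk]
    have h1 : Int.gcd (x + k) (y + k) = Int.gcd (x + k) (y - x) := by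
      conv_lhs => rw [show y + k = (y - x) + 1 * (x + k) by ring]
      rw [Int.gcd_add_mul_right_right]
    have h2 : Int.gcd (x + k) (y - x) = Int.gcd (x + k) d := by
      rw [hdset]; simp [Int.gcd, Int.natAbs_abs]
    rw [h1, h2]
    exact ⟨fun h => by exact_mod_cast h, fun h => by exact_mod_cast h⟩
  -- m is (-x) mod q for some divisor q ≥ 2 of d
  obtain ⟨q, hqd, hq2, hme0⟩ := bestLoop_is_cand x d hd2 (d + 2 - 2).toNat 2 _ le_rfl le_rfl
    ⟨d, dvd_rfl, hd2, rfl⟩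
  have hme : m = PySem.Int.mod (-x) q := hmset.trans hme0
  have hqpos : (0:Int) < q := by omega
  have hm0 : 0 ≤ m := by rw [hme]; exact PySem.Int.mod_nonneg (-x) hqpos
  -- the gcd test fails at k = m
  have hQm : Int.gcd (x + m) d ≠ 1 := by
    have hdvdxm : q ∣ x + m := by
      rw [hme, PySem.Int.mod_eq_emod_of_pos hqpos, Int.emod_def,
        show x + (-x - q * (-x / q)) = q * (-(-x / q)) by ring]
      exact Dvd.intro _ rfl
    intro h1
    have hcast : (q.natAbs : Int) = q := Int.natAbs_of_nonneg hqpos.le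
    have hnd : q.natAbs ∣ Int.gcd (x + m) d := Int.dvd_gcd (hcast ▸ hdvdxm) (hcast ▸ hqd)
    rw [h1] at hnd
    have := Nat.le_of_dvd one_pos hnd
    omega
  -- m is below the candidate of every divisor q' ≥ 2 of d
  have hMin : ∀ q' : Int, q' ∣ d → 2 ≤ q' → m ≤ PySem.Int.mod (-x) q' := by
    intro q' hq'd hq'2
    have hq'pos : (0:Int) < q' := by omega
    have hq'le : q' ≤ d := Int.le_of_dvd hdpos hq'd
    by_cases hqq : q' * q' ≤ d
    · exact hmset ▸ (bestLoop_le_cand x d (d + 2 - 2).toNat 2 _ q' le_rfl (by norm_num) hq'2 hqq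
        ((PySem.Int.mod_eq_zero_iff_dvd d q').mpr hq'd)).1
    · obtain ⟨c, hc⟩ := hq'd
      have hcpos : (0:Int) < c := by nlinarith
      have hcq' : c < q' := by nlinarith
      by_cases hc1 : c = 1
      · have hq'e : q' = d := by rw [hc, hc1, mul_one]
        rw [hq'e]
        exact hmset ▸ bestLoop_le x d (d + 2 - 2).toNat 2 _ le_rfl
      · have hc2 : (2:Int) ≤ c := by omega
        have hccd : c * c ≤ d := by nlinarith
        have hcd : c ∣ d := Dvd.intro_left q' hc.symm
        have hfdc : PySem.Int.floordiv d c = q' := by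
          rw [PySem.Int.floordiv_eq_ediv_of_pos hcpos, hc, Int.mul_ediv_cancel q' (by omega)]
        have := (bestLoop_le_cand x d (d + 2 - 2).toNat 2 (PySem.Int.mod (-x) d) c le_rfl (by norm_num) hc2 hccd
          ((PySem.Int.mod_eq_zero_iff_dvd d c).mpr hcd)).2
        rw [hfdc] at this
        exact hmset ▸ this
  -- below m every gcd test passes
  have hPrev : ∀ k : Int, 0 ≤ k → k < m → Int.gcd (x + k) d = 1 := by
    intro k hk hkm
    by_contra hne
    have hgd0 : Int.gcd (x + k) d ≠ 0 := by
      intro h0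
      have := (Int.gcd_eq_zero_iff.mp h0).2
      omega
    have hg2n : 2 ≤ Int.gcd (x + k) d := by omega
    set g : Int := (Int.gcd (x + k) d : Int) with hgset
    have hg2 : (2:Int) ≤ g := by rw [hgset]; exact_mod_cast hg2n
    have hgd : g ∣ d := Int.gcd_dvd_right _ _
    have hgx : g ∣ x + k := Int.gcd_dvd_left _ _
    have hmle : m ≤ PySem.Int.mod (-x) g := hMin g hgd hg2
    have hmodeq : k % g = (-x) % g := by
      have hmq : k ≡ -x [ZMOD g] := Int.modEq_iff_dvd.mpr
        (by rw [show -x - k = -(x + k) by ring]; exact dvd_neg.mpr hgx)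
      exact hmq
    have hkk : k % g ≤ k := by
      have hdivnn : 0 ≤ k / g := Int.ediv_nonneg hk (by omega)
      have := Int.emod_def k g
      nlinarith
    rw [PySem.Int.mod_eq_emod_of_pos (by omega : (0:Int) < g), ← hmodeq] at hmle
    omega
  -- conclude via the loop characterisations
  by_cases hm200 : m ≤ 200
  · rw [if_pos hm200]
    exact llcLoop_finds x y m.toNat 0 m (by omega) hm0 hm200
      (fun h => hQm ((bridge m hm0).mp h))
      (fun j h1 h2 => (bridge j h1).mpr (hPrev j h1 (by omega)))
  · rw [if_neg hm200]
    exact llcLoop_none x y 200 0 (by omega) (by omega)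
      (fun j h1 h2 => (bridge j h1).mpr (hPrev j h1 (by omega)))

-- the loop value at x = y = 1 (the only case reaching the loop with x = y)
theorem llcLoop_one : llcLoop 1 1 0 = 1 := by
  have g11 : pyGcd 1 1 = 1 := by rw [pyGcd_eq_gcd 1 1 one_pos]; norm_num
  have g22 : pyGcd 2 2 = 2 := by rw [pyGcd_eq_gcd 2 2 (by norm_num)]; norm_num
  rw [llcLoop]
  norm_num [g11]
  rw [llcLoop]
  norm_num [g22]

-- ===== VERDICT (by name: the statement is the Claim_ definition above) =====
theorem longest_lucky_chain_spec : Claim_equal_longest_lucky_chain := by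
  intro x y _
  unfold Spec_longest_lucky_chain longest_lucky_chain longest_lucky_chain_alt
  by_cases hg : pyGcd x y = 1
  · simp only [hg, ne_eq, not_true_eq_false, if_false]
    rcases lt_trichotomy y 0 with hy | hy | hy
    · exfalso
      have := pyGcd_nonpos_aux y.natAbs x y le_rfl hy
      omega
    · subst hy
      rw [pyGcd_zero] at hg
      subst hg
      norm_num
    · by_cases hd0 : |y - x| = 0
      · have hxy : x = y := by
          have := abs_eq_zero.mp hd0; omega
        have hx1 : x = 1 := by
          rw [hxy, pyGcd_eq_gcd y y hy] at hg
          have : Int.gcd y y = y.natAbs := by simp [Int.gcd]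
          rw [this] at hg
          omega
        have hy1 : y = 1 := by omega
        subst hx1
        subst hy1
        norm_num [llcLoop_one]
      · by_cases hd1 : |y - x| = 1
        · have hor : x = y + 1 ∨ y = x + 1 := by
            rcases abs_eq (by norm_num : (0:Int) ≤ 1) |>.mp hd1 with h | h
            · right; omega
            · left; omega
          rw [if_pos hor]
          simp only [hd1]
          norm_num
        · have hd2 : 2 ≤ |y - x| := by
            have := abs_nonneg (y - x); omega
          have hor : ¬(x = y + 1 ∨ y = x + 1) := by
            rintro (h | h)
            · apply hd1; rw [h]; norm_num
            · apply hd1; rw [h]; rw [show x + 1 - x = 1 by ring]; norm_num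
          rw [if_neg hor]
          simp only [if_neg hd0, if_neg hd1]
          exact llc_main x y hy hd2
  · rw [if_pos hg, if_pos hg]
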